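-- pv_equiv track=rewrite | github.com/marcomaida/claycode | experiments/tree_lib/encodings/power_digits.py | largest_pow
-- ===== SOURCE A (Python) =====
-- def largest_pow(n,b):
--     assert b > 1
--     assert n >= 1
--     max_exp = 0
--     val = 1
--     while val*b <= n:
--         max_exp+=1
--         val*=b
--
--     return max_exp
-- ===== SOURCE B (Python) =====
-- def largest_pow(n, b):
--     assert b > 1
--     assert n >= 1
--     # Phase 1: squarings of b not exceeding n: [b, b^2, b^4, b^8, ...]
--     squares = []
--     p = b
--     while p <= n:
--         squares.append(p)
--         p = p * p
--     # Phase 2: assemble the exponent's binary expansion, highest squaring first.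
--     # assemble(sqs, m) returns (m // b^e, e) where e is the largest exponent
--     # with b^e <= m that uses only the squarings in sqs.
--     def assemble(sqs, m):
--         if not sqs:
--             return m, 0
--         q = sqs[0]
--         m, e = assemble(sqs[1:], m)
--         if q <= m:
--             return m // q, 2 * e + 1
--         return m, 2 * e
--     _, e = assemble(squares, n)
--     return e
-- ===== Notes on version B (the rewrite author's own statement) =====
-- stated objective: alternative
-- what changed: B computes the exponent by binary expansion: it first builds the list of repeated squarings b, b^2, b^4, ... not exceeding n, then assembles the exponent bit by bit from the highest squaring down via floor divisions, instead of A's single loop multiplying a power accumulator by b once per exponent step.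
import Mathlib
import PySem

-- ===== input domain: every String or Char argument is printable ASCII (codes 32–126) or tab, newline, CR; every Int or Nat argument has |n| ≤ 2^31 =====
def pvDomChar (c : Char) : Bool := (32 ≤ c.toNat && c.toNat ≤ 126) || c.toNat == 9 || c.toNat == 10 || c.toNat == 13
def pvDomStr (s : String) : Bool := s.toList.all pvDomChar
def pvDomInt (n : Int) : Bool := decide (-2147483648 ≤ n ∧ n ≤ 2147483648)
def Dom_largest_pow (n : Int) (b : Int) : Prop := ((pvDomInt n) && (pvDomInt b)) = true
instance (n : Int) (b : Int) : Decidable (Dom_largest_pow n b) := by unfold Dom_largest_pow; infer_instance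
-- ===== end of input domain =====

-- B computes the exponent's binary expansion by repeated squaring (two phases)
-- instead of A's single loop multiplying an accumulator by b; alternative algorithm.

-- ===== PORT A =====
-- while val*b <= n: max_exp += 1; val *= b.  The extra '1 ≤ val ∧ 2 ≤ b' in the
-- guard only makes the recursion total; under Pre_ (b > 1) and the loop
-- invariant (val ≥ 1) it holds whenever the Python loop condition does.
def largest_powLoopA (n b val max_exp : Int) : Int :=
  if h : 1 ≤ val ∧ 2 ≤ b ∧ val * b ≤ n then
    largest_powLoopA n b (val * b) (max_exp + 1)
  else max_exp
termination_by (n - val).toNat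
decreasing_by
  obtain ⟨h1, h2, h3⟩ := h
  have : val * 2 ≤ val * b := mul_le_mul_of_nonneg_left h2 (by omega)
  omega

def largest_pow (n : Int) (b : Int) : Int :=
  largest_powLoopA n b 1 0

-- ===== PORT B =====
-- Phase 1: while p <= n: squares.append(p); p = p*p.  The '2 ≤ p' in the guard
-- only makes the recursion total; under Pre_ it always holds.
def sqListB (n p : Int) : List Int :=
  if h : 2 ≤ p ∧ p ≤ n then p :: sqListB n (p * p) else []
termination_by (n + 1 - p).toNat
decreasing_by
  obtain ⟨h1, h2⟩ := h
  have : p * 2 ≤ p * p := by nlinarith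
  omega

-- Phase 2: Source B's recursive 'assemble(sqs, m)'.
def assembleB (sqs : List Int) (m : Int) : Int × Int :=
  match sqs with
  | [] => (m, 0)
  | q :: rest =>
    let r := assembleB rest m
    if q ≤ r.1 then (PySem.Int.floordiv r.1 q, 2 * r.2 + 1) else (r.1, 2 * r.2)

def largest_pow_alt (n : Int) (b : Int) : Int :=
  (assembleB (sqListB n b) n).2

-- ===== PRECONDITION & SPEC =====
-- Pre_ excludes exactly the inputs on which A's asserts raise AssertionError (b ≤ 1 or n < 1).
def Pre_largest_pow (n : Int) (b : Int) : Prop := 1 < b ∧ 1 ≤ n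
instance (n : Int) (b : Int) : Decidable (Pre_largest_pow n b) := by unfold Pre_largest_pow; infer_instance
def pvWitness_largest_pow : Int × Int := (100, 3)

def Spec_largest_pow (n : Int) (b : Int) (out : Int) : Prop := out = largest_pow_alt n b
instance (n : Int) (b : Int) (out : Int) : Decidable (Spec_largest_pow n b out) := by unfold Spec_largest_pow; infer_instance

-- ===== CLAIM (what is proved, stated in full; the proofs are below) =====
def Claim_equal_largest_pow : Prop := ∀ (n : Int) (b : Int), Dom_largest_pow n b → Pre_largest_pow n b → Spec_largest_pow n b (largest_pow n b)

-- ===== LEMMAS AND PROOFS =====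

-- A's loop, started at val = b^k ≤ n, adds to acc the unique j with b^(k+j) ≤ n < b^(k+j+1).
theorem loopA_good (n b : Int) (hb : 2 ≤ b) (val acc : Int) (k : ℕ)
    (hval : val = b ^ k) (hv : 1 ≤ val) (hn : val ≤ n) :
    ∃ j : ℕ, largest_powLoopA n b val acc = acc + j ∧ b ^ (k + j) ≤ n ∧ n < b ^ (k + j + 1) := by
  by_cases hc : val * b ≤ n
  · rw [largest_powLoopA, dif_pos ⟨hv, hb, hc⟩]
    have hv' : 1 ≤ val * b := by nlinarith
    have hval' : val * b = b ^ (k + 1) := by rw [pow_succ, hval]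
    obtain ⟨j, hj, h1, h2⟩ := loopA_good n b hb (val * b) (acc + 1) (k + 1) hval' hv' hc
    refine ⟨j + 1, ?_, ?_, ?_⟩
    · rw [hj]; push_cast; ring
    · have : k + 1 + j = k + (j + 1) := by omega
      rwa [this] at h1
    · have : k + 1 + j + 1 = k + (j + 1) + 1 := by omega
      rwa [this] at h2
  · rw [largest_powLoopA, dif_neg (by tauto)]
    refine ⟨0, by simp, ?_, ?_⟩
    · simpa [← hval] using hn
    · rw [pow_succ, ← hval]; omega
termination_by (n - val).toNat
decreasing_by
  have : val * 2 ≤ val * b := mul_le_mul_of_nonneg_left hb (by omega)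
  omega

-- B's assemble over the squaring list of p leaves m / p^e with 1 ≤ m / p^e < p.
theorem assembleB_good (n : Int) (p m : Int) (hp : 2 ≤ p) (hm : 1 ≤ m) (hmn : m ≤ n) :
    ∃ k : ℕ, (assembleB (sqListB n p) m).2 = (k : Int) ∧
      (assembleB (sqListB n p) m).1 = m / p ^ k ∧
      1 ≤ m / p ^ k ∧ m / p ^ k < p := by
  by_cases hc : p ≤ n
  · rw [sqListB, dif_pos ⟨hp, hc⟩]
    have hp2 : 2 ≤ p * p := by nlinarith
    obtain ⟨k1, he1, hm1, hlo, hhi⟩ := assembleB_good n (p * p) m hp2 hm hmn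
    have hpk : (p * p) ^ k1 = p ^ (2 * k1) := by rw [two_mul, pow_add, mul_pow]
    have hppos : (0 : Int) < p := by omega
    have hpkpos : (0 : Int) < p ^ (2 * k1) := pow_pos hppos _
    rw [hpk] at hm1 hlo hhi
    simp only [assembleB]
    by_cases hq : p ≤ (assembleB (sqListB n (p * p)) m).1
    · rw [if_pos hq]
      refine ⟨2 * k1 + 1, ?_, ?_, ?_, ?_⟩
      · rw [he1]; push_cast; ring
      · rw [hm1, PySem.Int.floordiv_eq_ediv_of_pos hppos,
          Int.ediv_ediv_of_nonneg (le_of_lt hpkpos), ← pow_succ]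
      · rw [hm1] at hq
        rw [pow_succ, ← Int.ediv_ediv_of_nonneg (le_of_lt hpkpos)]
        rw [Int.le_ediv_iff_mul_le hppos]
        omega
      · rw [pow_succ, ← Int.ediv_ediv_of_nonneg (le_of_lt hpkpos)]
        rw [Int.ediv_lt_iff_lt_mul hppos]
        nlinarith
    · rw [if_neg hq]
      rw [hm1] at hq
      refine ⟨2 * k1, ?_, hm1, hlo, by omega⟩
      rw [he1]; push_cast; ring
  · rw [sqListB, dif_neg (by omega)]
    exact ⟨0, by simp [assembleB], by simp [assembleB], by simpa using hm, by simp; omega⟩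
termination_by (n + 1 - p).toNat
decreasing_by
  have : p * 2 ≤ p * p := by nlinarith
  omega

-- The exponent with b^k ≤ n < b^(k+1) is unique.
theorem exp_uniq (b n : Int) (hb : 2 ≤ b) (j k : ℕ)
    (h1 : b ^ j ≤ n) (h2 : n < b ^ (j + 1)) (h3 : b ^ k ≤ n) (h4 : n < b ^ (k + 1)) :
    j = k := by
  have hb1 : (1 : Int) ≤ b := by omega
  by_contra hne
  rcases Nat.lt_or_ge j k with h | h
  · have : b ^ (j + 1) ≤ b ^ k := pow_le_pow_right₀ hb1 (by omega)
    omega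
  · have hkj : k < j := by omega
    have : b ^ (k + 1) ≤ b ^ j := pow_le_pow_right₀ hb1 (by omega)
    omega

-- ===== VERDICT (by name: the statement is the Claim_ definition above) =====
theorem largest_pow_spec : Claim_equal_largest_pow := by
  intro n b _ hpre
  obtain ⟨hb, hn⟩ := hpre
  have hb2 : (2 : Int) ≤ b := by omega
  unfold Spec_largest_pow largest_pow largest_pow_alt
  obtain ⟨j, hjA, hj1, hj2⟩ := loopA_good n b hb2 1 0 0 (by simp) (by omega) hn
  obtain ⟨k, hkB, hmB, hlo, hhi⟩ := assembleB_good n b n hb2 hn le_rfl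
  have hppos : (0 : Int) < b := by omega
  have hpkpos : (0 : Int) < b ^ k := pow_pos hppos _
  have hk1 : b ^ k ≤ n := by
    have := (Int.le_ediv_iff_mul_le hpkpos).mp hlo
    omega
  have hk2 : n < b ^ (k + 1) := by
    have h := (Int.ediv_lt_iff_lt_mul hpkpos).mp hhi
    rw [pow_succ, mul_comm]
    exact h
  have : j = k := exp_uniq b n hb2 j k (by simpa using hj1) (by simpa using hj2) hk1 hk2
  rw [hjA, hkB, this]
  simp
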